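-- pv_equiv track=rewrite | github.com/amirbek-akramov/python-lessons | 36 - Checking the functions/Practise/practise3/practise_module.py | sort_the_numbers
-- ===== SOURCE A (Python) =====
-- def sort_the_numbers(min, max, evenNumber = True):
--     numbers = list(range(min,max))
--     even_numbers_list = []
--     odd_numbers_list = []
--
--     if evenNumber:
--         for number in numbers:
--             if number%2 == 0:
--                 even_numbers_list.append(number)
--
--         # return f"Even number(s) between {min} and {max}: {even_numbers_list}"
--         return even_numbers_list
--
--     else:
--         for number in numbers:
--             if number%2 != 0:
--                 odd_numbers_list.append(number)
--
--         # return f"Odd numbers between {min} and {max}: {odd_numbers_list}"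
--         return odd_numbers_list
-- ===== SOURCE B (Python) =====
-- def sort_the_numbers(min, max, evenNumber=True):
--     start = min if (min % 2 == 0) == evenNumber else min + 1
--     return list(range(start, max, 2))
-- ===== Notes on version B (the rewrite author's own statement) =====
-- stated objective: idiomatic
-- what changed: Instead of materialising every integer in range(min,max) and filtering by a modulo test inside a branch, B computes the first integer of the requested parity and enumerates only the matching integers with a stride-2 range.
import Mathlib
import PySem

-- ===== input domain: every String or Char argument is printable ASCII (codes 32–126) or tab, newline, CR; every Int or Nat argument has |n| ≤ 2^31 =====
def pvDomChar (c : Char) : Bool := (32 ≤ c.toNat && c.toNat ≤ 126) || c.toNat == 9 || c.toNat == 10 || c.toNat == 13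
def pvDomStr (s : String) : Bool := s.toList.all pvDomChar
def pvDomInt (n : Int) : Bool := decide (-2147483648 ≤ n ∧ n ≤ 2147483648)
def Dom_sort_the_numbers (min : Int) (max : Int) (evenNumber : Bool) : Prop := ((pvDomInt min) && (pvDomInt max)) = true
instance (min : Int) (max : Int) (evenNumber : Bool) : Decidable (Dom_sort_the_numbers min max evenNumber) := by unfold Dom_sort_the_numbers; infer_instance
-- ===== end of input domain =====

-- B replaces "enumerate range(min,max) and filter by a modulo test" with "start at the first
-- integer of the requested parity and enumerate a stride-2 range" (idiomatic, no per-element test).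


-- ===== PORT A =====
def sort_the_numbers (min : Int) (max : Int) (evenNumber : Bool) : List Int :=
  let numbers := PySem.List.pyRange min max 1
  if evenNumber then
    numbers.foldl (fun acc number => if PySem.Int.mod number 2 == 0 then acc ++ [number] else acc) []
  else
    numbers.foldl (fun acc number => if PySem.Int.mod number 2 != 0 then acc ++ [number] else acc) []

-- ===== PORT B =====
def sort_the_numbers_alt (min : Int) (max : Int) (evenNumber : Bool) : List Int :=
  let start := if (PySem.Int.mod min 2 == 0) == evenNumber then min else min + 1
  PySem.List.pyRange start max 2

-- ===== PRECONDITION & SPEC =====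
def Spec_sort_the_numbers (min : Int) (max : Int) (evenNumber : Bool) (out : List Int) : Prop := out = sort_the_numbers_alt min max evenNumber
instance (min : Int) (max : Int) (evenNumber : Bool) (out : List Int) : Decidable (Spec_sort_the_numbers min max evenNumber out) := by unfold Spec_sort_the_numbers; infer_instance

-- ===== CLAIM (what is proved, stated in full; the proofs are below) =====
def Claim_equal_sort_the_numbers : Prop := ∀ (min : Int) (max : Int) (evenNumber : Bool), Dom_sort_the_numbers min max evenNumber → Spec_sort_the_numbers min max evenNumber (sort_the_numbers min max evenNumber)

-- ===== LEMMAS AND PROOFS =====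

theorem pvMod2 (a : Int) : PySem.Int.mod a 2 = a % 2 := by
  simp [PySem.Int.mod]
  rw [Int.fmod_eq_emod]
  omega

theorem pvRange2_nil (a b : Int) (h : b ≤ a) : PySem.List.pyRange a b 2 = [] := by
  rw [PySem.List.pyRange_of_pos a b (by norm_num)]
  simp [show ¬ a < b by omega]

theorem pvRange2_cons (a b : Int) (h : a < b) : PySem.List.pyRange a b 2 = a :: PySem.List.pyRange (a + 2) b 2 := by
  rw [PySem.List.pyRange_of_pos a b (by norm_num), PySem.List.pyRange_of_pos (a + 2) b (by norm_num)]
  by_cases h2 : a + 2 < b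
  · rw [if_pos h, if_pos h2]
    have hn : ((b - a + 2 - 1) / 2).toNat = ((b - (a + 2) + 2 - 1) / 2).toNat + 1 := by omega
    rw [hn, List.range_succ_eq_map]
    simp only [List.map_cons, List.map_map]
    congr 1
    · norm_num
    · apply List.map_congr_left
      intro k _
      simp only [Function.comp_apply]
      push_cast
      ring
  · rw [if_pos h, if_neg h2]
    have hn : ((b - a + 2 - 1) / 2).toNat = 1 := by omega
    rw [hn]
    simp

theorem pvKey (ev : Bool) : ∀ (n : Nat) (a b : Int), (b - a).toNat = n →
    (PySem.List.pyRange a b 1).filter (fun x => (PySem.Int.mod x 2 == 0) == ev)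
      = PySem.List.pyRange (if (PySem.Int.mod a 2 == 0) == ev then a else a + 1) b 2 := by
  intro n
  induction n with
  | zero =>
    intro a b hn
    have hba : b ≤ a := by omega
    rw [PySem.List.pyRange_one_eq_nil hba]
    split
    · rw [pvRange2_nil a b hba]; simp
    · rw [pvRange2_nil (a + 1) b (by omega)]; simp
  | succ n ih =>
    intro a b hn
    have hab : a < b := by omega
    have hih := ih (a + 1) b (by omega)
    rw [PySem.List.pyRange_one_cons hab, List.filter_cons, hih]
    have h11 : a + 1 + 1 = a + 2 := by ring
    rw [h11]
    by_cases hA : a % 2 = 0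
    · have e1 : (PySem.Int.mod a 2 == 0) = true := by rw [pvMod2]; simp [hA]
      have e2 : (PySem.Int.mod (a + 1) 2 == 0) = false := by
        rw [pvMod2]; simp; omega
      rw [e1, e2]
      cases ev with
      | true =>
        simp
        exact (pvRange2_cons a b hab).symm
      | false => simp
    · have e1 : (PySem.Int.mod a 2 == 0) = false := by rw [pvMod2]; simp [hA]
      have e2 : (PySem.Int.mod (a + 1) 2 == 0) = true := by
        rw [pvMod2]; simp; omega
      rw [e1, e2]
      cases ev with
      | true => simp
      | false =>
        simp
        exact (pvRange2_cons a b hab).symm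

-- ===== VERDICT (by name: the statement is the Claim_ definition above) =====
theorem sort_the_numbers_spec : Claim_equal_sort_the_numbers := by
  intro mn mx ev _
  unfold Spec_sort_the_numbers sort_the_numbers sort_the_numbers_alt
  have hkey := pvKey ev (mx - mn).toNat mn mx rfl
  cases ev with
  | true =>
    simp only [if_true]
    have hfold := PySem.List.foldl_append_if (fun x => PySem.Int.mod x 2 == 0) id (PySem.List.pyRange mn mx 1) []
    simp only [List.nil_append, List.map_id, id_eq] at hfold
    rw [hfold]
    simpa using hkey
  | false =>
    simp only [Bool.false_eq_true, reduceIte]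
    have hfold := PySem.List.foldl_append_if (fun x => PySem.Int.mod x 2 != 0) id (PySem.List.pyRange mn mx 1) []
    simp only [List.nil_append, List.map_id, id_eq] at hfold
    rw [hfold]
    simpa [bne] using hkey
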